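-- pv_equiv track=rewrite | github.com/basin-dev/continue | stack.py | remove_copyright
-- ===== SOURCE A (Python) =====
-- def remove_copyright(contents: str) -> str:
--     """Remove the copyright header from a file."""
--     lines = contents.splitlines()
--
--     # Find the top comment block. This is usually what contains the copyright.
--     non_block_lines = []
--     block_lines = []
--     comment_block_started = False
--     comment_block_ended = False
--     for line in lines:
--         if comment_block_ended:
--             non_block_lines.append(line)
--         elif line.strip().startswith('#'):
--             comment_block_started = True
--             block_lines.append(line)
--         elif comment_block_started:
--             comment_block_ended = True
--             non_block_lines.append(line)
--
--     block = "\n".join(block_lines)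
--
--     # Determine if the block should be discarded
--     if "Copyright" in block or "License" in block:
--         return "\n".join(non_block_lines)
--     else:
--         return "\n".join(block_lines + non_block_lines)
-- ===== SOURCE B (Python) =====
-- def remove_copyright(contents: str) -> str:
--     """Remove the copyright header from a file."""
--     lines = contents.splitlines()
--     # Per-line signature: '#' marks a comment line. Search the signature, not the lines.
--     sig = "".join("#" if l.strip().startswith("#") else "." for l in lines)
--     i = sig.find("#")
--     if i < 0:
--         return ""  # no comment line anywhere
--     j = sig.find(".", i)
--     if j < 0:
--         j = len(lines)
--     block = "\n".join(lines[i:j])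
--     # block_lines + non_block_lines is exactly lines[i:], so the answer is a single suffix.
--     start = j if ("Copyright" in block or "License" in block) else i
--     return "\n".join(lines[start:])
-- ===== Notes on version B (the rewrite author's own statement) =====
-- stated objective: alternative
-- what changed: Replaced A's stateful flag loop that builds two line lists by a signature-string search: each line is compressed to one character ('#' for comment lines), str.find on that signature locates the block boundaries, and since block+rest is exactly lines[i:], the result is a single suffix slice rather than concatenated accumulator lists.
import Mathlib
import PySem

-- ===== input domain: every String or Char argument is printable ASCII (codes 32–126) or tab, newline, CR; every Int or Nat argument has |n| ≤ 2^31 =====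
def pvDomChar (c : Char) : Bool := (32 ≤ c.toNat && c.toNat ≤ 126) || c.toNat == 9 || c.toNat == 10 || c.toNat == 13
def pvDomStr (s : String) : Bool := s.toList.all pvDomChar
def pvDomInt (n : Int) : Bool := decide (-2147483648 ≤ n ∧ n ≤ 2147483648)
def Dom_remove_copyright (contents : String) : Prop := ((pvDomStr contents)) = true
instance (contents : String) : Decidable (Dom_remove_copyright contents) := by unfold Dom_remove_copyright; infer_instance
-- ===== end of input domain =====

-- B replaces A's stateful flag loop by a search over a one-character-per-line signature string,
-- returning a single suffix slice of the lines (alternative decomposition, same cost).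

-- ===== PORT A =====
-- one step of A's for-loop: state = (non_block_lines, block_lines, started, ended)
def rcStep (st : List String × List String × Bool × Bool) (line : String) :
    List String × List String × Bool × Bool :=
  if st.2.2.2 then (st.1 ++ [line], st.2.1, st.2.2.1, st.2.2.2)
  else if PySem.Str.startswith (PySem.Str.strip line) "#" then
    (st.1, st.2.1 ++ [line], true, st.2.2.2)
  else if st.2.2.1 then (st.1 ++ [line], st.2.1, st.2.2.1, true)
  else st

def remove_copyright (contents : String) : String :=
  let lines := PySem.Str.splitlines contents
  let st := lines.foldl rcStep ([], [], false, false)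
  let block := PySem.Str.join "\n" st.2.1
  if PySem.Str.isIn "Copyright" block || PySem.Str.isIn "License" block then
    PySem.Str.join "\n" st.1
  else
    PySem.Str.join "\n" (st.2.1 ++ st.1)

-- ===== PORT B =====
def rcIsComment (l : String) : Bool := PySem.Str.startswith (PySem.Str.strip l) "#"

def remove_copyright_alt (contents : String) : String :=
  let lines := PySem.Str.splitlines contents
  let sig := PySem.Str.join "" (lines.map (fun l => if rcIsComment l then "#" else "."))
  let i := PySem.Str.find sig "#"
  if i < 0 then ""
  else
    let j0 := PySem.Str.findFrom sig "." i
    let j := if j0 < 0 then (lines.length : Int) else j0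
    let block := PySem.Str.join "\n" (PySem.List.slice lines (some i) (some j))
    let start := if PySem.Str.isIn "Copyright" block || PySem.Str.isIn "License" block then j else i
    PySem.Str.join "\n" (PySem.List.slice lines (some start) none)

-- ===== PRECONDITION & SPEC =====
def Spec_remove_copyright (contents : String) (out : String) : Prop := out = remove_copyright_alt contents
instance (contents : String) (out : String) : Decidable (Spec_remove_copyright contents out) := by unfold Spec_remove_copyright; infer_instance

-- ===== CLAIM (what is proved, stated in full; the proofs are below) =====
def Claim_equal_remove_copyright : Prop := ∀ (contents : String), Dom_remove_copyright contents → Spec_remove_copyright contents (remove_copyright contents)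

-- ===== LEMMAS AND PROOFS =====

-- rcStep's test written through B's predicate name (definitional)
theorem rcStep_eq (st : List String × List String × Bool × Bool) (line : String) :
    rcStep st line =
      if st.2.2.2 then (st.1 ++ [line], st.2.1, st.2.2.1, st.2.2.2)
      else if rcIsComment line then (st.1, st.2.1 ++ [line], true, st.2.2.2)
      else if st.2.2.1 then (st.1 ++ [line], st.2.1, st.2.2.1, true)
      else st := rfl

-- once ended, every remaining line is appended to non_block_lines
theorem rcFold_ended (rest : List String) (nb bl : List String) (s : Bool) :
    rest.foldl rcStep (nb, bl, s, true) = (nb ++ rest, bl, s, true) := by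
  induction rest generalizing nb with
  | nil => simp
  | cons h t ih => simp [rcStep, ih]

-- in the started phase, the fold takes the comment prefix into block_lines and the rest into non_block_lines
theorem rcFold_started (rest : List String) (nb bl : List String) :
    rest.foldl rcStep (nb, bl, true, false) =
      (nb ++ rest.dropWhile rcIsComment, bl ++ rest.takeWhile rcIsComment, true,
        !(rest.dropWhile rcIsComment).isEmpty) := by
  induction rest generalizing nb bl with
  | nil => simp
  | cons h t ih =>
    by_cases hp : rcIsComment h = true
    · simp [rcStep_eq, hp, ih]
    · simp only [Bool.not_eq_true] at hp
      simp [rcStep_eq, hp, rcFold_ended]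

-- before any comment line, non-comment lines are discarded
theorem rcFold_skip (rest : List String) :
    rest.foldl rcStep ([], [], false, false) =
      (rest.dropWhile (fun l => !rcIsComment l)).foldl rcStep ([], [], false, false) := by
  induction rest with
  | nil => rfl
  | cons h t ih =>
    by_cases hp : rcIsComment h = true
    · simp [hp]
    · simp only [Bool.not_eq_true] at hp
      simp [hp, ← ih, rcStep_eq]

-- characterisation of A's final state (the two list components)
theorem rcFold_char (lines : List String) :
    ((lines.foldl rcStep ([], [], false, false)).1 =
       (lines.dropWhile (fun l => !rcIsComment l)).dropWhile rcIsComment) ∧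
    ((lines.foldl rcStep ([], [], false, false)).2.1 =
       (lines.dropWhile (fun l => !rcIsComment l)).takeWhile rcIsComment) := by
  rw [rcFold_skip]
  cases hd : lines.dropWhile (fun l => !rcIsComment l) with
  | nil => simp
  | cons h t =>
    have hp : rcIsComment h = true := by
      have := List.head_dropWhile_not (p := fun l => !rcIsComment l) (l := lines)
      simp [hd] at this
      simpa using this
    simp only [List.foldl_cons]
    have : rcStep ([], [], false, false) h = ([], [h], true, false) := by
      simp [rcStep_eq, hp]
    rw [this, rcFold_started]
    simp [hp]

-- [c] is a prefix of xs iff xs starts with c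
theorem singleton_prefix_iff {α : Type} (c : α) (xs : List α) :
    [c] <+: xs ↔ xs.head? = some c := by
  cases xs with
  | nil => simp
  | cons h t => simp [List.cons_prefix_cons, eq_comm]

-- single-character find = findIdx (as an Int), when the character occurs
theorem find_singleton (cs : List Char) (c : Char) (h : c ∈ cs) :
    PySem.Chars.find cs [c] = (cs.findIdx (· == c) : Int) := by
  have hin : [c] <:+: cs := by
    obtain ⟨l₁, l₂, rfl⟩ := List.append_of_mem h
    exact ⟨l₁, l₂, by simp⟩
  have hnn : 0 ≤ PySem.Chars.find cs [c] := (PySem.Chars.find_nonneg_iff cs [c]).2 hin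
  obtain ⟨hpre, hmin⟩ := PySem.Chars.find_spec (s := cs) (sub := [c]) hnn
  set k := (PySem.Chars.find cs [c]).toNat with hk
  have hklen : k < cs.length := by
    rcases Nat.lt_or_ge k cs.length with h' | h'
    · exact h'
    · exfalso
      rw [singleton_prefix_iff, List.head?_drop] at hpre
      simp [List.getElem?_eq_none h'] at hpre
  have hck : cs[k] = c := by
    rw [singleton_prefix_iff, List.head?_drop] at hpre
    simpa [List.getElem?_eq_getElem hklen] using hpre
  have : cs.findIdx (· == c) = k := by
    rw [List.findIdx_eq hklen]
    refine ⟨by simp [hck], ?_⟩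
    intro j hj
    have := hmin j hj
    rw [singleton_prefix_iff, List.head?_drop] at this
    have hjlen : j < cs.length := lt_trans hj hklen
    simp [List.getElem?_eq_getElem hjlen] at this
    simp [this]
  rw [this, hk]
  omega

theorem find_singleton_neg (cs : List Char) (c : Char) (h : c ∉ cs) :
    PySem.Chars.find cs [c] = -1 := by
  rw [PySem.Chars.find_eq_neg_one_iff]
  intro hin
  exact h (hin.mem (by simp))

-- the signature's characters are the per-line classification characters
theorem sig_toList (lines : List String) :
    (PySem.Str.join "" (lines.map (fun l => if rcIsComment l then "#" else "."))).toList =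
      lines.map (fun l => if rcIsComment l then '#' else '.') := by
  rw [PySem.Str.toList_join]
  have : (lines.map (fun l => if rcIsComment l then "#" else ".")).map String.toList =
      (lines.map (fun l => if rcIsComment l then '#' else '.')).map ([·]) := by
    simp only [List.map_map, List.map_inj_left]
    intro l _
    by_cases hp : rcIsComment l <;> simp [hp]
  simp only [this]
  exact PySem.Chars.join_nil_singletons _

-- findIdx through the classification map
theorem findIdx_sig (lines : List String) :
    (lines.map (fun l => if rcIsComment l then '#' else '.')).findIdx (· == '#') =
      lines.findIdx rcIsComment := by
  rw [List.findIdx_map]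
  have h : ((· == '#') ∘ fun l => if rcIsComment l then '#' else '.') = rcIsComment := by
    funext l
    by_cases hp : rcIsComment l <;> simp [hp]
  rw [h]

theorem findIdx_sig_dot (lines : List String) :
    (lines.map (fun l => if rcIsComment l then '#' else '.')).findIdx (· == '.') =
      lines.findIdx (fun l => !rcIsComment l) := by
  rw [List.findIdx_map]
  have h : ((· == '.') ∘ fun l => if rcIsComment l then '#' else '.') = (fun l => !rcIsComment l) := by
    funext l
    by_cases hp : rcIsComment l <;> simp [hp]
  rw [h]

-- the two boundary scans of B expressed as dropWhile/takeWhile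
theorem drop_findIdx (p : String → Bool) (lines : List String) :
    lines.drop (lines.findIdx p) = lines.dropWhile (fun l => !p l) := by
  induction lines with
  | nil => rfl
  | cons h t ih =>
    by_cases hp : p h = true
    · simp [List.findIdx_cons, hp]
    · simp only [Bool.not_eq_true] at hp
      simp [List.findIdx_cons, hp, ih]

theorem take_findIdx_not (p : String → Bool) (lines : List String) :
    lines.take (lines.findIdx (fun l => !p l)) = lines.takeWhile p := by
  induction lines with
  | nil => rfl
  | cons h t ih =>
    by_cases hp : p h = true
    · simp [List.findIdx_cons, hp, ih]
    · simp only [Bool.not_eq_true] at hp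
      simp [List.findIdx_cons, hp]

theorem drop_findIdx_not (p : String → Bool) (lines : List String) :
    lines.drop (lines.findIdx (fun l => !p l)) = lines.dropWhile p := by
  induction lines with
  | nil => rfl
  | cons h t ih =>
    by_cases hp : p h = true
    · simp [List.findIdx_cons, hp, ih]
    · simp only [Bool.not_eq_true] at hp
      simp [List.findIdx_cons, hp]

-- ===== VERDICT (by name: the statement is the Claim_ definition above) =====
set_option maxHeartbeats 1600000 in
theorem remove_copyright_spec : Claim_equal_remove_copyright := by
  intro contents _
  unfold Spec_remove_copyright remove_copyright remove_copyright_alt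
  set lines := PySem.Str.splitlines contents with hl
  obtain ⟨h1, h2⟩ := rcFold_char lines
  simp only [h1, h2]
  have hsig := sig_toList lines
  by_cases hc : ∃ l ∈ lines, rcIsComment l = true
  · -- some comment line exists
    have hmem : '#' ∈ lines.map (fun l => if rcIsComment l then '#' else '.') := by
      obtain ⟨l, hml, hpl⟩ := hc
      exact List.mem_map.2 ⟨l, hml, by simp [hpl]⟩
    have hfind : PySem.Str.find
        (PySem.Str.join "" (lines.map (fun l => if rcIsComment l then "#" else "."))) "#"
        = (lines.findIdx rcIsComment : Int) := by
      rw [PySem.Str.find_eq, hsig]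
      have : "#".toList = ['#'] := rfl
      rw [this, find_singleton _ _ hmem, findIdx_sig]
    set k := lines.findIdx rcIsComment with hkdef
    have hklt : k < lines.length := List.findIdx_lt_length_of_exists hc
    have hk0 : ¬ ((k : Int) < 0) := by omega
    rw [hfind]
    simp only [hk0, if_false]
    -- evaluate the findFrom
    have hlen : (lines.map (fun l => if rcIsComment l then '#' else '.')).length = lines.length := by
      simp
    have hff : PySem.Str.findFrom
        (PySem.Str.join "" (lines.map (fun l => if rcIsComment l then "#" else "."))) "." (k : Int)
        = PySem.Chars.findFrom (lines.map (fun l => if rcIsComment l then '#' else '.')) ['.'] (k : Int) none := by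
      rw [PySem.Str.findFrom_eq, hsig]; rfl
    have hkle : k ≤ (lines.map (fun l => if rcIsComment l then '#' else '.')).length := by
      omega
    rw [hff, PySem.Chars.findFrom_natCast _ _ _ hkle]
    have hdropmap : (lines.map (fun l => if rcIsComment l then '#' else '.')).drop k
        = (lines.drop k).map (fun l => if rcIsComment l then '#' else '.') := by
      exact (List.map_drop ..).symm
    have hdk : lines.drop k = lines.dropWhile (fun l => !rcIsComment l) := drop_findIdx _ _
    by_cases hd : ∃ l ∈ lines.drop k, rcIsComment l = false
    · -- a non-comment line follows the block
      have hmem2 : '.' ∈ (lines.drop k).map (fun l => if rcIsComment l then '#' else '.') := by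
        obtain ⟨l, hml, hpl⟩ := hd
        exact List.mem_map.2 ⟨l, hml, by simp [hpl]⟩
      have hex2 : ∃ l ∈ lines.drop k, (!rcIsComment l) = true := by
        obtain ⟨l, hml, hpl⟩ := hd
        exact ⟨l, hml, by simp [hpl]⟩
      set m := (lines.drop k).findIdx (fun l => !rcIsComment l) with hmdef
      have hfind2 : PySem.Chars.find
          ((lines.map (fun l => if rcIsComment l then '#' else '.')).drop k) ['.'] = (m : Int) := by
        rw [hdropmap, find_singleton _ _ hmem2, findIdx_sig_dot]
      have hm0 : ¬ ((m : Int) = -1) := by omega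
      rw [hfind2]
      simp only [hm0, if_false]
      have hj0 : ¬ ((k : Int) + (m : Int) < 0) := by omega
      simp only [hj0, if_false]
      -- block of B = block of A
      have hblock : PySem.List.slice lines (some (k : Int)) (some ((k : Int) + (m : Int)))
          = (lines.dropWhile (fun l => !rcIsComment l)).takeWhile rcIsComment := by
        rw [PySem.List.slice_natCast_add, ← hdk, hmdef, take_findIdx_not, hdk]
      rw [hblock]
      by_cases hmk : (PySem.Str.isIn "Copyright"
            (PySem.Str.join "\n" ((lines.dropWhile (fun l => !rcIsComment l)).takeWhile rcIsComment)) ||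
          PySem.Str.isIn "License"
            (PySem.Str.join "\n" ((lines.dropWhile (fun l => !rcIsComment l)).takeWhile rcIsComment))) = true
      · simp only [hmk, if_true]
        congr 1
        have : ((k : Int) + (m : Int)) = ((k + m : Nat) : Int) := by push_cast; ring
        rw [this, PySem.List.slice_from_natCast, ← List.drop_drop, hmdef, drop_findIdx_not, hdk]
      · rw [Bool.not_eq_true] at hmk
        simp only [hmk, Bool.false_eq_true, if_false]
        rw [PySem.List.slice_from_natCast, hdk, List.takeWhile_append_dropWhile]
    · -- everything from k on is a comment line
      push Not at hd
      have hall : ∀ l ∈ lines.drop k, rcIsComment l = true := by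
        intro l hml
        cases hpl : rcIsComment l with
        | true => rfl
        | false => exact absurd hpl (by simpa using hd l hml)
      have hnotmem : '.' ∉ (lines.drop k).map (fun l => if rcIsComment l then '#' else '.') := by
        intro hm
        obtain ⟨l, hml, hpl⟩ := List.mem_map.1 hm
        rw [hall l hml] at hpl
        simp at hpl
      have hfind2 : PySem.Chars.find
          ((lines.map (fun l => if rcIsComment l then '#' else '.')).drop k) ['.'] = -1 := by
        rw [hdropmap]
        exact find_singleton_neg _ _ hnotmem
      rw [hfind2]
      norm_num
      -- nb = [] and bl = drop k
      have hnb : (lines.dropWhile (fun l => !rcIsComment l)).dropWhile rcIsComment = [] := by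
        rw [← hdk, List.dropWhile_eq_nil_iff]
        intro l hml
        simp [hall l hml]
      have hbl : (lines.dropWhile (fun l => !rcIsComment l)).takeWhile rcIsComment
          = lines.drop k := by
        rw [← hdk, List.takeWhile_eq_self_iff.2 hall]
      have hblock : PySem.List.slice lines (some (k : Int)) (some ((lines.length : Nat) : Int))
          = lines.drop k := by
        rw [PySem.List.slice_natCast, List.take_of_length_le (by simp)]
      rw [hblock, hnb, hbl]
      by_cases hmk : (PySem.Chars.isIn "Copyright".toList
            (PySem.Chars.join "\n".toList (List.map String.toList (lines.drop k))) = true ∨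
          PySem.Chars.isIn "License".toList
            (PySem.Chars.join "\n".toList (List.map String.toList (lines.drop k))) = true)
      · rw [if_pos hmk, if_pos hmk, PySem.List.slice_from_natCast,
          List.drop_of_length_le (by omega)]
      · rw [if_neg hmk, if_neg hmk, PySem.List.slice_from_natCast, hdk]
  · -- no comment line at all: A keeps nothing, B returns ""
    push Not at hc
    have hnone : ∀ l ∈ lines, rcIsComment l = false := by
      intro l hml
      cases hpl : rcIsComment l with
      | true => exact absurd hpl (by simpa using hc l hml)
      | false => rfl
    have hnotmem : '#' ∉ lines.map (fun l => if rcIsComment l then '#' else '.') := by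
      intro hm
      obtain ⟨l, hml, hpl⟩ := List.mem_map.1 hm
      rw [hnone l hml] at hpl
      simp at hpl
    have hfind : PySem.Str.find
        (PySem.Str.join "" (lines.map (fun l => if rcIsComment l then "#" else "."))) "#" = -1 := by
      rw [PySem.Str.find_eq, hsig]
      exact find_singleton_neg _ _ hnotmem
    rw [hfind]
    norm_num
    have hdrop : lines.dropWhile (fun l => !rcIsComment l) = [] := by
      rw [List.dropWhile_eq_nil_iff]
      intro l hml
      simp [hnone l hml]
    rw [hdrop]
    simp only [List.takeWhile_nil, List.dropWhile_nil]
    decide
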